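-- pv_equiv track=rewrite | github.com/Right5963/metacard- | filter_only.py | filter_tags
-- ===== SOURCE A (Python) =====
-- EXCLUDE_TAGS = [
--     # 永久BAN
--     'cum', 'bukkake', 'facial', 'semen', 'ejaculation',
--     'sex', 'sexual intercourse', 'penetration', 'insertion',
--     'pov hands', 'hand on breast pov', 'groping pov',
--     # wet系
--     'wet', 'wet clothes', 'wet shirt', 'wet swimsuit',
--     'pool', 'poolside', 'swimming pool', 'in pool', 'pool ladder',
--     'beach', 'ocean', 'sea', 'shore', 'seaside', 'water', 'horizon',
--     # キャラ不一致
--     'one side up',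
-- ]
--
-- def filter_tags(tag_string):
--     """除外タグを削除"""
--     tags = [tag.strip() for tag in tag_string.split(',')]
--     filtered_tags = []
--
--     for tag in tags:
--         tag_lower = tag.lower()
--         if not any(exclude.lower() in tag_lower for exclude in EXCLUDE_TAGS):
--             filtered_tags.append(tag)
--
--     return ', '.join(filtered_tags)
-- ===== SOURCE B (Python) =====
-- EXCLUDE_TAGS = [
--     # 永久BAN
--     'cum', 'bukkake', 'facial', 'semen', 'ejaculation',
--     'sex', 'sexual intercourse', 'penetration', 'insertion',
--     'pov hands', 'hand on breast pov', 'groping pov',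
--     # wet系
--     'wet', 'wet clothes', 'wet shirt', 'wet swimsuit',
--     'pool', 'poolside', 'swimming pool', 'in pool', 'pool ladder',
--     'beach', 'ocean', 'sea', 'shore', 'seaside', 'water', 'horizon',
--     # キャラ不一致
--     'one side up',
-- ]
--
-- # Patterns lowercased once, up front (A lowercases every exclude for every tag).
-- _PATTERNS = [e.lower() for e in EXCLUDE_TAGS]
--
--
-- def _search(s):
--     """Single left-to-right scan: at each position, try every pattern as a prefix."""
--     for i in range(len(s) + 1):
--         for p in _PATTERNS:
--             if s.startswith(p, i):
--                 return True
--     return False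
--
--
-- def filter_tags(tag_string):
--     """除外タグを削除"""
--     tags = [tag.strip() for tag in tag_string.split(',')]
--     return ', '.join(t for t in tags if not _search(t.lower()))
-- ===== Notes on version B (the rewrite author's own statement) =====
-- stated objective: alternative
-- what changed: A checks each tag with a separate substring scan per excluded term (any exclude.lower() in tag); B lowercases the patterns once and runs a single left-to-right scan over each tag, trying every pattern as a prefix at each position (a naive multi-pattern matcher), filtering in one pass.
import Mathlib
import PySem

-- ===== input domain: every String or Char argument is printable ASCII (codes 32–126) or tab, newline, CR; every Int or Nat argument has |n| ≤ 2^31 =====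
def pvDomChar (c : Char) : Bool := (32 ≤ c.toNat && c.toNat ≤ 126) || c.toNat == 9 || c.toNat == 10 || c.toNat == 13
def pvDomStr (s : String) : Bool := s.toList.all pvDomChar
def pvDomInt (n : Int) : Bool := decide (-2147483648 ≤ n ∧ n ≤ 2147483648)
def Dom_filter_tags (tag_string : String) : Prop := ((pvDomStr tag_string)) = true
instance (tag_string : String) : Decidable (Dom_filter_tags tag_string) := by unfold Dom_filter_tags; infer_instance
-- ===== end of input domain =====

-- B replaces A's per-exclude substring scans by one left-to-right position scan trying
-- every (pre-lowercased) pattern as a prefix; objective: alternative (no speed claim).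

def EXCLUDE_TAGS : List String := [
  "cum", "bukkake", "facial", "semen", "ejaculation",
  "sex", "sexual intercourse", "penetration", "insertion",
  "pov hands", "hand on breast pov", "groping pov",
  "wet", "wet clothes", "wet shirt", "wet swimsuit",
  "pool", "poolside", "swimming pool", "in pool", "pool ladder",
  "beach", "ocean", "sea", "shore", "seaside", "water", "horizon",
  "one side up"]

-- ===== PORT A =====
def filter_tags (tag_string : String) : String :=
  let tags := ((PySem.Str.split? tag_string ",").getD []).map (fun tag => PySem.Str.strip tag)
  let filtered_tags := tags.foldl (fun acc tag =>
    let tag_lower := PySem.Str.lower tag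
    if !(EXCLUDE_TAGS.any (fun exclude => PySem.Str.isIn (PySem.Str.lower exclude) tag_lower))
    then acc ++ [tag] else acc) []
  PySem.Str.join ", " filtered_tags

-- ===== PORT B =====
-- _PATTERNS: excludes lowercased once, up front
def pvPatterns : List (List Char) := EXCLUDE_TAGS.map (fun e => PySem.Chars.lower e.toList)

-- _search: at each position of s (i.e. each suffix), try every pattern as a prefix
def pvSearch (pats : List (List Char)) : List Char → Bool
  | [] => pats.any (fun p => p.isPrefixOf ([] : List Char))
  | c :: t => pats.any (fun p => p.isPrefixOf (c :: t)) || pvSearch pats t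

def filter_tags_alt (tag_string : String) : String :=
  let tags := ((PySem.Str.split? tag_string ",").getD []).map (fun tag => PySem.Str.strip tag)
  PySem.Str.join ", " (tags.filter (fun t => !(pvSearch pvPatterns (PySem.Str.lower t).toList)))

-- ===== PRECONDITION & SPEC =====
def Spec_filter_tags (tag_string : String) (out : String) : Prop := out = filter_tags_alt tag_string
instance (tag_string : String) (out : String) : Decidable (Spec_filter_tags tag_string out) := by unfold Spec_filter_tags; infer_instance

-- ===== CLAIM (what is proved, stated in full; the proofs are below) =====
def Claim_equal_filter_tags : Prop := ∀ (tag_string : String), Dom_filter_tags tag_string → Spec_filter_tags tag_string (filter_tags tag_string)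

-- ===== LEMMAS AND PROOFS =====

-- the position scan finds a match iff some pattern is an infix
lemma pvSearch_iff (pats : List (List Char)) (s : List Char) :
    pvSearch pats s = true ↔ ∃ p ∈ pats, p <:+: s := by
  induction s with
  | nil => simp [pvSearch]
  | cons c t ih =>
    simp only [pvSearch, Bool.or_eq_true, List.any_eq_true, ih, List.infix_cons_iff,
      List.isPrefixOf_iff_prefix]
    constructor
    · rintro (⟨p, hp, h⟩ | ⟨p, hp, h⟩)
      · exact ⟨p, hp, Or.inl h⟩
      · exact ⟨p, hp, Or.inr h⟩
    · rintro ⟨p, hp, h | h⟩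
      · exact Or.inl ⟨p, hp, h⟩
      · exact Or.inr ⟨p, hp, h⟩

lemma pvSearch_eq_any_isIn (pats : List (List Char)) (s : List Char) :
    pvSearch pats s = pats.any (fun p => PySem.Chars.isIn p s) := by
  rw [Bool.eq_iff_iff, pvSearch_iff]
  simp [PySem.Chars.isIn_iff_infix]

lemma pred_eq (tag : String) :
    (EXCLUDE_TAGS.any (fun exclude => PySem.Str.isIn (PySem.Str.lower exclude) (PySem.Str.lower tag)))
      = pvSearch pvPatterns (PySem.Str.lower tag).toList := by
  rw [pvSearch_eq_any_isIn]
  simp [pvPatterns, List.any_map, Function.comp_def]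

-- ===== VERDICT (by name: the statement is the Claim_ definition above) =====
theorem filter_tags_spec : Claim_equal_filter_tags := by
  intro tag_string _
  show filter_tags tag_string = filter_tags_alt tag_string
  unfold filter_tags filter_tags_alt
  simp only [PySem.List.foldl_append_if, List.nil_append, List.map_id']
  congr 1
  exact List.filter_congr (fun t _ => by rw [pred_eq])
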